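-- pv_equiv track=rewrite | github.com/byeol-hub/programmers | 프로그래머스/1/86051. 없는 숫자 더하기/없는 숫자 더하기.py | solution
-- ===== SOURCE A (Python) =====
-- def solution(numbers):
--     answer = 0
--
--     num = [0,1,2,3,4,5,6,7,8,9]
--
--     for i in numbers:
--         if i in num:
--             num.remove(i)
--
--     for i in num:
--         answer += i
--
--     return answer
-- ===== SOURCE B (Python) =====
-- def solution(numbers):
--     return 45 - sum(set(numbers) & set(range(10)))
-- ===== Notes on version B (the rewrite author's own statement) =====
-- stated objective: simpler
-- what changed: Replaces the mutable digit-list remove loop and the summation loop with the closed form 45 minus the sum of the distinct in-range digits (set intersection), a single expression with no mutation.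
import Mathlib
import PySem

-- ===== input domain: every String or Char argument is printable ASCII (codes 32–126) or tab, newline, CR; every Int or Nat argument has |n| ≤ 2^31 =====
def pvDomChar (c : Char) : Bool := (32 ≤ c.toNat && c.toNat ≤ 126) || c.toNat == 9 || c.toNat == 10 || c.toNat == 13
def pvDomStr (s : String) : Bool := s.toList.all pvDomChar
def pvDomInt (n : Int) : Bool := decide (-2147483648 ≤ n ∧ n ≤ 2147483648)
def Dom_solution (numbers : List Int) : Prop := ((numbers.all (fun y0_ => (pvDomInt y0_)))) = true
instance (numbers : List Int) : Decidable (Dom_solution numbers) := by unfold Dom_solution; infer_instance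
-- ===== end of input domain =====

-- B replaces A's remove-from-a-digit-list loop and summation loop by the closed form
-- 45 - sum(set(numbers) & set(range(10))): simpler, no mutation.

-- ===== PORT A =====
def solution (numbers : List Int) : Int :=
  -- answer = 0; num = [0..9]
  -- for i in numbers: if i in num: num.remove(i)   (remove cannot raise: guarded by membership)
  let num : List Int :=
    numbers.foldl
      (fun num i =>
        if num.contains i then
          match PySem.List.remove? num i with
          | some r => r
          | none => num
        else num)
      [0,1,2,3,4,5,6,7,8,9]
  -- for i in num: answer += i
  num.foldl (fun answer i => answer + i) 0

-- ===== PORT B =====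
def solution_alt (numbers : List Int) : Int :=
  45 - (PySem.Set.inter (PySem.Set.ofList numbers)
          (PySem.Set.ofList (PySem.List.pyRange 0 10 1))).sum

-- ===== PRECONDITION & SPEC =====
def Spec_solution (numbers : List Int) (out : Int) : Prop := out = solution_alt numbers
instance (numbers : List Int) (out : Int) : Decidable (Spec_solution numbers out) := by unfold Spec_solution; infer_instance

-- ===== CLAIM (what is proved, stated in full; the proofs are below) =====
def Claim_equal_solution : Prop := ∀ (numbers : List Int), Dom_solution numbers → Spec_solution numbers (solution numbers)

-- ===== LEMMAS AND PROOFS =====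

-- A's loop, run on any duplicate-free list L, leaves exactly the elements of L not in numbers.
theorem foldl_remove_eq_filter (numbers : List Int) :
    ∀ (L : List Int), L.Nodup →
      numbers.foldl
        (fun num i =>
          if num.contains i then
            match PySem.List.remove? num i with
            | some r => r
            | none => num
          else num) L
      = L.filter (fun d => !numbers.contains d) := by
  induction numbers with
  | nil => intro L _; simp
  | cons i rest ih =>
    intro L hL
    simp only [List.foldl_cons]
    by_cases hi : i ∈ L
    · rw [if_pos (by simpa using hi), PySem.List.remove?_eq_some_erase L i hi]
      rw [ih _ (hL.erase i), List.Nodup.erase_eq_filter hL]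
      rw [List.filter_filter]
      congr 1
      funext d
      by_cases hdi : d = i <;> by_cases hdr : d ∈ rest <;> simp [hdi, hdr, bne]
    · rw [if_neg (by simpa using hi), ih _ hL]
      apply List.filter_congr
      intro d hd
      have : d ≠ i := fun h => hi (h ▸ hd)
      simp [this]

theorem sum_filter_split (L : List Int) (p : Int → Bool) :
    (L.filter p).sum + (L.filter (fun d => !p d)).sum = L.sum := by
  induction L with
  | nil => simp
  | cons x xs ih =>
    by_cases h : p x <;> simp [h, ← ih] <;> ring

-- B's intersection is a permutation of [0..9] filtered by membership in numbers, hence equal sums.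
theorem inter_perm (numbers : List Int) :
    (PySem.Set.inter (PySem.Set.ofList numbers)
        (PySem.Set.ofList (PySem.List.pyRange 0 10 1))).Perm
      (([0,1,2,3,4,5,6,7,8,9] : List Int).filter (fun d => numbers.contains d)) := by
  have hnd1 : (PySem.Set.inter (PySem.Set.ofList numbers)
      (PySem.Set.ofList (PySem.List.pyRange 0 10 1))).Nodup :=
    PySem.Set.nodup_inter _ _ (PySem.Set.nodup_ofList _)
  have hnd2 : (([0,1,2,3,4,5,6,7,8,9] : List Int).filter (fun d => numbers.contains d)).Nodup :=
    List.Nodup.filter _ (by decide)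
  rw [List.perm_ext_iff_of_nodup hnd1 hnd2]
  intro a
  rw [PySem.Set.mem_inter]
  simp only [PySem.Set.mem_ofList, List.mem_filter, List.contains_iff_mem,
    PySem.List.mem_pyRange_one]
  constructor
  · rintro ⟨ha, h0, h10⟩
    exact ⟨by interval_cases a <;> simp, ha⟩
  · rintro ⟨ha, hm⟩
    refine ⟨hm, ?_, ?_⟩ <;> (fin_cases ha <;> decide)

-- ===== VERDICT (by name: the statement is the Claim_ definition above) =====
theorem solution_spec : Claim_equal_solution := by
  intro numbers _
  unfold Spec_solution solution solution_alt
  simp only []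
  rw [foldl_remove_eq_filter numbers _ (by decide)]
  have hfold : ∀ (l : List Int), l.foldl (fun answer i => answer + i) 0 = l.sum := by
    intro l; exact List.sum_eq_foldl.symm
  rw [hfold]
  have hperm := (inter_perm numbers).sum_eq
  rw [hperm]
  have hsplit := sum_filter_split ([0,1,2,3,4,5,6,7,8,9] : List Int) (fun d => numbers.contains d)
  have h45 : (([0,1,2,3,4,5,6,7,8,9] : List Int)).sum = 45 := by decide
  omega
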